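-- pv_equiv track=rewrite | github.com/miliar/Code_Jam_Webscraper | solutions_python/Problem_201/2140.py | computeLsRs
-- ===== SOURCE A (Python) =====
-- def countLeft(pos, stalls):
--   count = 0
--
--   for i in range(pos-1, -1, -1):
--     if stalls[i] == 'O': break
--     count += 1
--
--   return count
--
-- def countRight(pos, stalls):
--   count = 0
--
--   for i in range(pos+1, len(stalls)):
--     if stalls[i] == 'O': break
--     count += 1
--
--   return count
--
-- def computeLsRs(stalls):
--   ll = []
--   for i in range(len(stalls)):
--     if stalls[i] == 'O': continue
--     ls = countLeft(i, stalls)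
--     rs = countRight(i, stalls)
--     ll.append((min(ls, rs), max(ls, rs), len(stalls) -1 - i))
--   return ll
-- ===== SOURCE B (Python) =====
-- def computeLsRs(stalls):
--   n = len(stalls)
--   L = [0] * (n + 1)
--   for i in range(n):
--     L[i + 1] = 0 if stalls[i] == 'O' else L[i] + 1
--   R = [0] * (n + 1)
--   for i in range(n - 1, -1, -1):
--     R[i] = 0 if stalls[i] == 'O' else R[i + 1] + 1
--   out = []
--   for i in range(n):
--     if stalls[i] != 'O':
--       ls, rs = L[i], R[i + 1]
--       out.append((min(ls, rs), max(ls, rs), n - 1 - i))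
--   return out
-- ===== Notes on version B (the rewrite author's own statement) =====
-- stated objective: faster
-- what changed: Replaces A's per-empty-stall left/right rescans (countLeft/countRight) with two linear passes that precompute, for every index, the empty-run length ending before it and starting at it, then one pass assembles the tuples by table lookup.
import Mathlib
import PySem

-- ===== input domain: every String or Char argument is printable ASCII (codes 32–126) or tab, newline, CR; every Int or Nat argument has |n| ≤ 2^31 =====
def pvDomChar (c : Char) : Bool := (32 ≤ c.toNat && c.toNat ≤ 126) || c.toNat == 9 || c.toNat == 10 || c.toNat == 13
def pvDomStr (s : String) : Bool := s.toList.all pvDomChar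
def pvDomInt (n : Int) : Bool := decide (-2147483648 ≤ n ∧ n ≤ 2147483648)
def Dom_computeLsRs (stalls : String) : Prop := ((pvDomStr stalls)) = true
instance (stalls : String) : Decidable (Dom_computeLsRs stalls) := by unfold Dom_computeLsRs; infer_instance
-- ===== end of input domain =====

-- B replaces A's per-stall rescans by two linear passes precomputing the empty-run
-- lengths on each side (objective: faster, O(n^2) → O(n)).

-- ===== PORT A =====
-- countLeft(pos, stalls): scan indices pos-1, pos-2, …, 0, breaking at 'O'.
def countLeftGo (cs : List Char) : Nat → Int → Int
  | 0, count => count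
  | j + 1, count => if cs.getD j ' ' == 'O' then count else countLeftGo cs j (count + 1)

-- countRight(pos, stalls): scan indices pos+1, …, len-1, breaking at 'O'.
def countRightGo (cs : List Char) (i : Nat) (count : Int) : Int :=
  if _h : i < cs.length then
    (if cs.getD i ' ' == 'O' then count else countRightGo cs (i + 1) (count + 1))
  else count
termination_by cs.length - i

def computeLsRs (stalls : String) : List (Int × Int × Int) :=
  let cs := stalls.toList
  let n := cs.length
  (List.range n).foldl
    (fun ll i =>
      if cs.getD i ' ' == 'O' then ll
      else
        let ls := countLeftGo cs i 0
        let rs := countRightGo cs (i + 1) 0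
        ll ++ [(min ls rs, max ls rs, (n : Int) - 1 - (i : Int))])
    []

-- ===== PORT B =====
-- forward pass: mkL cs a = [a, L1, L2, …]; entry i is the length of the empty run
-- ending just before index i (the Python list L).
def mkL : List Char → Int → List Int
  | [], a => [a]
  | c :: rest, a => a :: mkL rest (if c == 'O' then 0 else a + 1)

-- backward pass: entry i is the length of the empty run starting at index i (the Python list R).
def mkR : List Char → List Int
  | [] => [0]
  | c :: rest =>
    let r := mkR rest
    (if c == 'O' then 0 else r.headD 0 + 1) :: r

def computeLsRs_alt (stalls : String) : List (Int × Int × Int) :=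
  let cs := stalls.toList
  let n := cs.length
  let L := mkL cs 0
  let R := mkR cs
  (List.range n).filterMap
    (fun i =>
      if cs.getD i ' ' == 'O' then none
      else
        let ls := L.getD i 0
        let rs := R.getD (i + 1) 0
        some (min ls rs, max ls rs, (n : Int) - 1 - (i : Int)))

-- ===== PRECONDITION & SPEC =====
def Spec_computeLsRs (stalls : String) (out : List (Int × Int × Int)) : Prop := out = computeLsRs_alt stalls
instance (stalls : String) (out : List (Int × Int × Int)) : Decidable (Spec_computeLsRs stalls out) := by unfold Spec_computeLsRs; infer_instance

-- ===== CLAIM (what is proved, stated in full; the proofs are below) =====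
def Claim_equal_computeLsRs : Prop := ∀ (stalls : String), Dom_computeLsRs stalls → Spec_computeLsRs stalls (computeLsRs stalls)

-- ===== LEMMAS AND PROOFS =====

-- value of the forward pass at index i, as a recurrence over the index
lemma mkL_getD_succ (i : Nat) : ∀ (cs : List Char) (a : Int), i < cs.length →
    (mkL cs a).getD (i + 1) 0 =
      if cs.getD i ' ' == 'O' then 0 else (mkL cs a).getD i 0 + 1 := by
  induction i with
  | zero =>
    intro cs a h
    match cs with
    | c :: rest =>
      by_cases hc : c = 'O' <;> cases rest <;> simp [mkL, hc]
  | succ j ih =>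
    intro cs a h
    match cs with
    | c :: rest =>
      have hlt : j < rest.length := by simpa using Nat.lt_of_succ_lt_succ h
      simp only [mkL, List.getD_cons_succ]
      rw [ih rest _ hlt]

lemma countLeftGo_eq_mkL (cs : List Char) (i : Nat) (hi : i ≤ cs.length) :
    ∀ count : Int, countLeftGo cs i count = count + (mkL cs 0).getD i 0 := by
  induction i with
  | zero => intro count; cases cs <;> simp [countLeftGo, mkL]
  | succ j ih =>
    intro count
    have hj : j < cs.length := hi
    rw [countLeftGo, mkL_getD_succ j cs 0 hj]
    by_cases h : (cs.getD j ' ' == 'O') = true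
    · rw [if_pos h, if_pos h]; ring
    · rw [if_neg h, if_neg h, ih (Nat.le_of_lt hj) (count + 1)]; ring

-- value of the backward pass at index i, as a recurrence over the index
lemma mkR_getD (cs : List Char) : ∀ i : Nat,
    (mkR cs).getD i 0 =
      if i < cs.length then
        (if cs.getD i ' ' == 'O' then 0 else (mkR cs).getD (i + 1) 0 + 1)
      else 0 := by
  induction cs with
  | nil => intro i; cases i <;> simp [mkR]
  | cons c rest ih =>
    intro i
    match i with
    | 0 =>
      simp only [mkR, List.getD_cons_zero, List.getD_cons_succ, List.length_cons]
      rw [if_pos (Nat.succ_pos _)]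
      cases hmr : mkR rest with
      | nil => simp
      | cons x xs => simp
    | j + 1 =>
      simp only [mkR, List.getD_cons_succ, List.length_cons]
      rw [ih j]
      simp

lemma countRightGo_eq_mkR (cs : List Char) (i : Nat) (count : Int) :
    countRightGo cs i count = count + (mkR cs).getD i 0 := by
  fun_induction countRightGo cs i count with
  | case1 i count h hO =>
    rw [mkR_getD cs i, if_pos h, if_pos hO]; ring
  | case2 i count h hO ih =>
    rw [ih, mkR_getD cs i, if_pos h, if_neg hO]; ring
  | case3 i count h =>
    rw [mkR_getD cs i, if_neg h]; ring

-- A's accumulate-by-append loop written as a filterMap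
lemma foldl_append_if_filterMap {α β : Type} (p : α → Bool) (f : α → β) :
    ∀ (l : List α) (acc : List β),
      l.foldl (fun ll i => if p i then ll else ll ++ [f i]) acc =
        acc ++ l.filterMap (fun i => if p i then none else some (f i)) := by
  intro l
  induction l with
  | nil => intro acc; simp
  | cons x xs ih =>
    intro acc
    by_cases h : p x
    · simp [List.foldl_cons, h, ih]
    · simp [List.foldl_cons, h, ih]

-- ===== VERDICT (by name: the statement is the Claim_ definition above) =====
theorem computeLsRs_spec : Claim_equal_computeLsRs := by
  intro stalls _
  unfold Spec_computeLsRs computeLsRs computeLsRs_alt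
  set cs := stalls.toList with hcs
  rw [foldl_append_if_filterMap (fun i => cs.getD i ' ' == 'O')
      (fun i => (min (countLeftGo cs i 0) (countRightGo cs (i + 1) 0),
                 max (countLeftGo cs i 0) (countRightGo cs (i + 1) 0),
                 (cs.length : Int) - 1 - (i : Int)))]
  simp only [List.nil_append]
  apply List.filterMap_congr
  intro i hi
  have hilt : i < cs.length := List.mem_range.mp hi
  rw [countLeftGo_eq_mkL cs i (Nat.le_of_lt hilt) 0,
      countRightGo_eq_mkR cs (i + 1) 0]
  simp only [zero_add]
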